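-- pv_equiv track=rewrite | github.com/xiaorancs/business-exit-risk-forecast | feature/5_feature.py | getMAlterno
-- ===== SOURCE A (Python) =====
-- def getMAlterno(x):
--     x = list(x)
--     x.sort()
--     m = x[0]
--
--     mk = 0
--     mm = x[0]
--
--     k = 1
--     n = len(x)
--
--     for i in range(1,n):
--         if x[i] == x[i-1]:
--             k+=1
--         else:
--             if k>mk:
--                 mk = k
--                 mm = x[i-1]
--
--             k = 1
--     return mm
-- ===== SOURCE B (Python) =====
-- def getMAlterno(x):
--     counts = {}
--     for v in x:
--         counts[v] = counts.get(v, 0) + 1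
--     return max(sorted(counts), key=lambda v: counts[v])
-- ===== Notes on version B (the rewrite author's own statement) =====
-- stated objective: idiomatic
-- what changed: A sorts the whole list and scans adjacent pairs with a running best-run accumulator (never flushing the final run); B builds a counting dict in one pass and takes max over the sorted keys by count, so B returns the true mode (smallest on ties).
-- intended difference: When the maximum element of x is the unique strict mode (and x is not constant), A never flushes that last sorted run and returns the mode of the remaining values, while B returns the maximum element itself, which is the intended mode. — e.g. on getMAlterno([1, 2, 2]): A returns 1, B returns 2
import Mathlib
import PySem

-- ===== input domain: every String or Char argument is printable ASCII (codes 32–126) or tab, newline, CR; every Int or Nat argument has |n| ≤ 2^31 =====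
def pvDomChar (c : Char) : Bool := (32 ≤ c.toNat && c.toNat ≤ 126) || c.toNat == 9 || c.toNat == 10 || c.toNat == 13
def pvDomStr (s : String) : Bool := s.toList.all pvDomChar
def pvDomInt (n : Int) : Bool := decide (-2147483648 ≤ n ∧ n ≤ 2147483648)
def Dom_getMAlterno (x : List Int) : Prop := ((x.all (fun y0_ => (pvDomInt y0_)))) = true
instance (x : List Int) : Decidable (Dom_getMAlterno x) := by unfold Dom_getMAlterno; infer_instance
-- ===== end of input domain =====

-- B computes the mode (smallest winner on ties) with a counting dict instead of A's
-- sorted-adjacent-scan, which forgets to flush its final run; return value only.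

-- ===== PORT A =====
-- loop body of A's 'for i in range(1,n)': state (mk, mm, k)
def getMAlterno_body (s : List Int) (st : Int × Int × Int) (i : Int) : Int × Int × Int :=
  if PySem.List.pyGetD s i 0 == PySem.List.pyGetD s (i - 1) 0 then
    (st.1, st.2.1, st.2.2 + 1)
  else if st.2.2 > st.1 then
    (st.2.2, PySem.List.pyGetD s (i - 1) 0, 1)
  else
    (st.1, st.2.1, 1)

def getMAlterno (x : List Int) : Int :=
  let s := PySem.List.sorted x (fun v => v)
  let _m := PySem.List.pyGetD s 0 0          -- m (unused; the raise on empty input is excluded by Pre_)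
  let mm0 := PySem.List.pyGetD s 0 0         -- mm, the first sorted element
  let n := PySem.List.len s
  let r := (PySem.List.pyRange 1 n).foldl (getMAlterno_body s) (0, mm0, 1)
  r.2.1

-- ===== PORT B =====
def getMAlterno_alt (x : List Int) : Int :=
  let counts := x.foldl (fun d v => PySem.Dict.insert d v (PySem.Dict.getD d v 0 + 1)) (PySem.Dict.empty : PySem.Dict Int Int)
  match PySem.List.max? (PySem.List.sorted (PySem.Dict.keys counts) (fun v => v))
      (fun v => PySem.Dict.getD counts v 0) with
  | some v => v
  | none => 0          -- unreachable under Pre_: max() on an empty dict raises ValueError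

-- ===== PRECONDITION & SPEC =====
-- A indexes the first element of the sorted list (and B calls max() on the counts):
-- an empty input raises in both, so it is excluded.
def Pre_getMAlterno (x : List Int) : Prop := x ≠ []
instance (x : List Int) : Decidable (Pre_getMAlterno x) := by unfold Pre_getMAlterno; infer_instance
def pvWitness_getMAlterno : List Int := [1, 1, 2]

-- When the maximum element of x is its unique strict mode (and x is not constant), A's loop
-- never flushes that final sorted run and returns the mode of the remaining values, while B
-- returns the true mode (the maximum element), which is the intended value.
def D_getMAlterno (x : List Int) : Prop :=
  ∃ M ∈ x, (∀ v ∈ x, v ≤ M) ∧ (∃ v ∈ x, v ≠ M) ∧ (∀ v ∈ x, v ≠ M → x.count v < x.count M)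
instance (x : List Int) : Decidable (D_getMAlterno x) := by unfold D_getMAlterno; infer_instance

def Spec_getMAlterno (x : List Int) (out : Int) : Prop := ¬ D_getMAlterno x → out = getMAlterno_alt x
instance (x : List Int) (out : Int) : Decidable (Spec_getMAlterno x out) := by unfold Spec_getMAlterno; infer_instance

def pvDiffWitness_getMAlterno : List Int := [1, 2, 2]
def pvDiffWitnessOut_getMAlterno : Int × Int := (1, 2)

-- ===== CLAIM (what is proved, stated in full; the proofs are below) =====
def Claim_unchanged_getMAlterno : Prop := ∀ (x : List Int), Dom_getMAlterno x → Pre_getMAlterno x → Spec_getMAlterno x (getMAlterno x)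
def Claim_changed_getMAlterno : Prop := Dom_getMAlterno (pvDiffWitness_getMAlterno) ∧ Pre_getMAlterno (pvDiffWitness_getMAlterno) ∧ D_getMAlterno (pvDiffWitness_getMAlterno) ∧ getMAlterno (pvDiffWitness_getMAlterno) = pvDiffWitnessOut_getMAlterno.1 ∧ getMAlterno_alt (pvDiffWitness_getMAlterno) = pvDiffWitnessOut_getMAlterno.2 ∧ pvDiffWitnessOut_getMAlterno.1 ≠ pvDiffWitnessOut_getMAlterno.2
def Claim_exact_getMAlterno : Prop := ∀ (x : List Int), Dom_getMAlterno x → Pre_getMAlterno x → D_getMAlterno x → getMAlterno x ≠ getMAlterno_alt x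

-- ===== LEMMAS AND PROOFS =====

-- run-length encoding of w^c ++ t (proof-side characterisation of A's loop and of the counts)
def rleCore : Int → Int → List Int → List (Int × Int)
  | w, c, [] => [(w, c)]
  | w, c, v :: t => if v = w then rleCore w (c + 1) t else (w, c) :: rleCore v 1 t

-- the flush step of A, on (best count, best value)
def flushStep (st : Int × Int) (p : Int × Int) : Int × Int :=
  if p.2 > st.1 then (p.2, p.1) else st

-- A's loop re-expressed structurally: prev = previous element, t = rest
def pairFold : Int → List Int → Int × Int × Int → Int × Int × Int
  | _, [], st => st
  | prev, v :: t, st =>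
      pairFold v t (if v = prev then (st.1, st.2.1, st.2.2 + 1)
                    else if st.2.2 > st.1 then (st.2.2, prev, 1)
                    else (st.1, st.2.1, 1))

theorem rleCore_ne_nil (w c : Int) (t : List Int) : rleCore w c t ≠ [] := by
  induction t generalizing w c with
  | nil => simp [rleCore]
  | cons v t ih => simp only [rleCore]; split <;> simp [ih]

theorem rleCore_pos (t : List Int) (w c : Int) (hc : 1 ≤ c) :
    ∀ p ∈ rleCore w c t, 1 ≤ p.2 := by
  induction t generalizing w c with
  | nil => intro p hp; simp [rleCore] at hp; subst hp; exact hc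
  | cons v t ih =>
    intro p hp
    simp only [rleCore] at hp
    split at hp
    · exact ih w (c + 1) (by omega) p hp
    · rcases List.mem_cons.mp hp with h | h
      · subst h; exact hc
      · exact ih v 1 le_rfl p h

-- bridge: A's index loop over range(j+1, n) equals pairFold on the suffix
theorem bridge (t : List Int) : ∀ (s : List Int) (j : Nat) (st : Int × Int × Int),
    s.drop (j + 1) = t →
    (PySem.List.pyRange ((j : Int) + 1) (PySem.List.len s)).foldl (getMAlterno_body s) st
      = pairFold (s.getD j 0) t st := by
  induction t with
  | nil =>
    intro s j st hd
    have hlen : s.length ≤ j + 1 := by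
      by_contra h
      have := List.length_drop (l := s) (i := j + 1)
      rw [hd] at this; simp at this; omega
    rw [PySem.List.pyRange_one_eq_nil (by simp [PySem.List.len]; exact_mod_cast hlen)]
    simp [pairFold]
  | cons v t ih =>
    intro s j st hd
    have hj1 : j + 1 < s.length := by
      by_contra h
      have : s.drop (j + 1) = [] := List.drop_eq_nil_of_le (by omega)
      rw [hd] at this; simp at this
    have h0 : s[j + 1]? = some v := by
      have h1 := congrArg (fun l => l[0]?) hd
      simpa using h1
    have hv : s.getD (j + 1) 0 = v := by
      rw [List.getD_eq_getElem s 0 hj1]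
      have h2 : some s[j + 1] = some v := by
        rw [← List.getElem?_eq_getElem hj1]; exact h0
      exact Option.some.inj h2
    have hd2 : s.drop (j + 2) = t := by
      have h3 : s.drop (j + 2) = (s.drop (j + 1)).drop 1 := by
        rw [List.drop_drop]
      rw [h3, hd]; simp
    rw [PySem.List.pyRange_one_cons (by simp [PySem.List.len]; exact_mod_cast hj1)]
    rw [List.foldl_cons]
    have hcast : ((j : Int) + 1) + 1 = ((j + 1 : Nat) : Int) + 1 := by push_cast; ring
    rw [hcast, ih s (j + 1) _ hd2, hv]
    conv_rhs => rw [pairFold]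
    congr 1
    unfold getMAlterno_body
    have e1 : PySem.List.pyGetD s ((j : Int) + 1) 0 = v := by
      rw [show ((j : Int) + 1) = ((j + 1 : Nat) : Int) by push_cast; ring,
        PySem.List.pyGetD_natCast, hv]
    have e2 : PySem.List.pyGetD s ((j : Int) + 1 - 1) 0 = s.getD j 0 := by
      rw [show ((j : Int) + 1 - 1) = ((j : Nat) : Int) by ring,
        PySem.List.pyGetD_natCast]
    rw [e1, e2]
    by_cases hvp : v = s.getD j 0
    · simp [hvp]
    · simp only [hvp, beq_iff_eq, if_false]

-- main characterisation of A's loop: flush every run except the last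
theorem pairFold_eq_flush (t : List Int) :
    ∀ (prev k mk mm : Int),
    (pairFold prev t (mk, mm, k)).2.1
      = ((rleCore prev k t).dropLast.foldl flushStep (mk, mm)).2 := by
  induction t with
  | nil => intro prev k mk mm; simp [pairFold, rleCore]
  | cons v t ih =>
    intro prev k mk mm
    by_cases hv : v = prev
    · simp only [pairFold, rleCore, if_pos hv]
      subst hv
      exact ih v (k + 1) mk mm
    · simp only [pairFold, rleCore, if_neg hv]
      have hne := rleCore_ne_nil v 1 t
      rw [List.dropLast_cons_of_ne_nil hne, List.foldl_cons]
      by_cases hk : k > mk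
      · rw [if_pos hk]
        rw [ih v 1 k prev]
        congr 1
        simp [flushStep, hk]
      · rw [if_neg hk]
        rw [ih v 1 mk mm]
        congr 1
        simp only [flushStep]
        rw [if_neg (by simpa using hk)]

-- Python max(.., key) on a nonempty pair list agrees with A's flush fold
-- (first maximal pair wins in both)
theorem max?_cons_flush (gr : List (Int × Int)) : ∀ (b : Int × Int),
    PySem.List.max? (b :: gr) (fun g => g.2)
      = some ((gr.foldl flushStep (b.2, b.1)).2, (gr.foldl flushStep (b.2, b.1)).1) := by
  induction gr with
  | nil => intro b; simp [PySem.List.max?]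
  | cons p gr ih =>
    intro b
    have h1 : PySem.List.max? (b :: p :: gr) (fun g : Int × Int => g.2)
        = PySem.List.max? ((if b.2 < p.2 then p else b) :: gr) (fun g : Int × Int => g.2) := by
      simp only [PySem.List.max?, List.foldl_cons]
      congr 1
      split <;> rfl
    have h2 : flushStep (b.2, b.1) p
        = ((if b.2 < p.2 then p else b).2, (if b.2 < p.2 then p else b).1) := by
      simp only [flushStep, gt_iff_lt]
      split_ifs <;> simp
    rw [h1, ih, List.foldl_cons, h2]

-- every first component of the run table is the head value or a later element
theorem rle_fst_mem (t : List Int) : ∀ (h c : Int), ∀ p ∈ rleCore h c t, p.1 = h ∨ p.1 ∈ t := by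
  induction t with
  | nil => intro h c p hp; simp [rleCore] at hp; subst hp; simp
  | cons v t ih =>
    intro h c p hp
    simp only [rleCore] at hp
    by_cases hv : v = h
    · rw [if_pos hv] at hp
      rcases ih h (c + 1) p hp with h1 | h1
      · exact Or.inl h1
      · exact Or.inr (List.mem_cons_of_mem v h1)
    · rw [if_neg hv] at hp
      rcases List.mem_cons.mp hp with h1 | h1
      · subst h1; simp
      · rcases ih v 1 p h1 with h1 | h1
        · exact Or.inr (by simp [h1])
        · exact Or.inr (List.mem_cons_of_mem v h1)

-- every element of the list appears as a first component of its run table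
theorem rle_mem_fst (t : List Int) : ∀ (h c : Int), ∀ v ∈ h :: t, v ∈ (rleCore h c t).map Prod.fst := by
  induction t with
  | nil => intro h c v hv; simp at hv; simp [rleCore, hv]
  | cons w t ih =>
    intro h c v hv
    simp only [rleCore]
    by_cases hw : w = h
    · rw [if_pos hw]
      rcases List.mem_cons.mp hv with h1 | h1
      · exact ih h (c + 1) v (by simp [h1])
      · exact ih h (c + 1) v (hw ▸ h1)
    · rw [if_neg hw]
      simp only [List.map_cons]
      rcases List.mem_cons.mp hv with h1 | h1
      · exact by simp [h1]
      · exact List.mem_cons_of_mem h (ih w 1 v h1)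

-- on a sorted list the run values are strictly increasing
theorem rle_fst_pairwise (t : List Int) : ∀ (h c : Int), (h :: t).Pairwise (· ≤ ·) →
    ((rleCore h c t).map Prod.fst).Pairwise (· < ·) := by
  induction t with
  | nil => intro h c _; simp [rleCore]
  | cons v t ih =>
    intro h c hs
    rw [List.pairwise_cons] at hs
    obtain ⟨hhle, hvt⟩ := hs
    simp only [rleCore]
    by_cases hv : v = h
    · rw [if_pos hv]
      exact ih h (c + 1) (hv ▸ hvt)
    · rw [if_neg hv]
      have hhv : h < v := lt_of_le_of_ne (hhle v (by simp)) (Ne.symm hv)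
      simp only [List.map_cons, List.pairwise_cons]
      constructor
      · intro y hy
        obtain ⟨p, hp, hpy⟩ := List.mem_map.mp hy
        have hvle := List.pairwise_cons.mp hvt
        rcases rle_fst_mem t v 1 p hp with h1 | h1
        · omega
        · have := hvle.1 p.1 h1; omega
      · exact ih v 1 hvt

-- on a sorted list each run length is the element count
theorem rle_count (t : List Int) : ∀ (h c : Int), (h :: t).Pairwise (· ≤ ·) →
    ∀ p ∈ rleCore h c t, p.2 = if p.1 = h then c + t.count h else t.count p.1 := by
  induction t with
  | nil => intro h c _ p hp; simp [rleCore] at hp; subst hp; simp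
  | cons v t ih =>
    intro h c hs p hp
    rw [List.pairwise_cons] at hs
    obtain ⟨hhle, hvt⟩ := hs
    simp only [rleCore] at hp
    by_cases hv : v = h
    · rw [if_pos hv] at hp
      have key := ih h (c + 1) (hv ▸ hvt) p hp
      subst hv
      by_cases hph : p.1 = v
      · rw [if_pos hph] at key ⊢
        rw [List.count_cons_self]
        push_cast; omega
      · rw [if_neg hph] at key ⊢
        have hcc : List.count p.1 (v :: t) = List.count p.1 t := by
          simp [List.count_cons]; omega
        rw [hcc]
        exact key
    · rw [if_neg hv] at hp
      have hhv : h < v := lt_of_le_of_ne (hhle v (by simp)) (Ne.symm hv)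
      have hvle := List.pairwise_cons.mp hvt
      rcases List.mem_cons.mp hp with h1 | h1
      · rw [h1]
        have hnot : (v :: t).count h = 0 := by
          rw [List.count_eq_zero]
          intro hmem
          rcases List.mem_cons.mp hmem with h2 | h2
          · omega
          · have := hvle.1 h h2; omega
        rw [hnot]; simp
      · have key := ih v 1 hvt p h1
        have hpv : v ≤ p.1 := by
          rcases rle_fst_mem t v 1 p h1 with h2 | h2
          · omega
          · exact hvle.1 p.1 h2
        have hph : p.1 ≠ h := by omega
        rw [if_neg hph]
        by_cases hpv2 : p.1 = v
        · rw [if_pos hpv2] at key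
          rw [hpv2, List.count_cons_self]
          push_cast; omega
        · rw [if_neg hpv2] at key
          have hcc : List.count p.1 (v :: t) = List.count p.1 t := by
            simp [List.count_cons]; omega
          rw [hcc]
          exact key

-- the run table starts with the head value
theorem rle_head (t : List Int) (h c : Int) :
    ∃ k rest, rleCore h c t = (h, k) :: rest := by
  induction t generalizing c with
  | nil => exact ⟨c, [], rfl⟩
  | cons v t ih =>
    simp only [rleCore]
    split
    · exact ih (c + 1)
    · exact ⟨c, rleCore v 1 t, rfl⟩

-- max? over the first components with a key that reads off the second component
-- Python max over the run values, keyed by their counts, is max over the runs by count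
theorem max?_cons_cons {α : Type} (key : α → Int) (a b : α) (l : List α) :
    PySem.List.max? (a :: b :: l) key
      = PySem.List.max? ((if key a < key b then b else a) :: l) key := by
  simp only [PySem.List.max?, List.foldl_cons]
  congr 1
  split <;> rfl

theorem max?_map_fst_cons (Gt : List (Int × Int)) (key : Int → Int) :
    ∀ g : Int × Int, (∀ p ∈ g :: Gt, key p.1 = p.2) →
    PySem.List.max? ((g :: Gt).map Prod.fst) key
      = (PySem.List.max? (g :: Gt) (fun q => q.2)).map Prod.fst := by
  induction Gt with
  | nil => intro g _; simp [PySem.List.max?]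
  | cons p Gt ih =>
    intro g hk
    have hkg : key g.1 = g.2 := hk g (by simp)
    have hkp : key p.1 = p.2 := hk p (by simp)
    rw [List.map_cons, List.map_cons,
        max?_cons_cons key g.1 p.1 (Gt.map Prod.fst),
        max?_cons_cons (fun q : Int × Int => q.2) g p Gt]
    by_cases hgp : g.2 < p.2
    · rw [if_pos (show key g.1 < key p.1 by rw [hkg, hkp]; exact hgp), if_pos hgp]
      have h1 := ih p (by
        intro q hq
        rcases List.mem_cons.mp hq with h1 | h1
        · rw [h1]; exact hkp
        · exact hk q (List.mem_cons_of_mem g (List.mem_cons_of_mem p h1)))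
      simpa using h1
    · rw [if_neg (show ¬ key g.1 < key p.1 by rw [hkg, hkp]; exact hgp), if_neg hgp]
      have h1 := ih g (by
        intro q hq
        rcases List.mem_cons.mp hq with h1 | h1
        · rw [h1]; exact hkg
        · exact hk q (List.mem_cons_of_mem g (List.mem_cons_of_mem p h1)))
      simpa using h1

theorem max?_map_fst (G : List (Int × Int)) (key : Int → Int)
    (hk : ∀ p ∈ G, key p.1 = p.2) :
    PySem.List.max? (G.map Prod.fst) key
      = (PySem.List.max? G (fun p => p.2)).map Prod.fst := by
  cases G with
  | nil => simp [PySem.List.max?]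
  | cons g Gt => exact max?_map_fst_cons Gt key g hk

-- max? of a list with one pair appended
theorem max?_append_singleton (F : List (Int × Int)) (p mF : Int × Int)
    (hm : PySem.List.max? F (fun q => q.2) = some mF) :
    PySem.List.max? (F ++ [p]) (fun q => q.2) = some (if mF.2 < p.2 then p else mF) := by
  simp only [PySem.List.max?] at hm ⊢
  rw [List.foldl_append, hm]
  simp only [List.foldl]
  split <;> rfl

-- the joint characterisation: outside D_ the two ports agree, inside it A's value is strictly below B's
theorem getM_cases (x : List Int) (hx : x ≠ []) :
    (¬ D_getMAlterno x → getMAlterno x = getMAlterno_alt x) ∧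
    (D_getMAlterno x → getMAlterno x < getMAlterno_alt x) := by
  unfold getMAlterno getMAlterno_alt
  simp only []
  set s := PySem.List.sorted x (fun v => v) with hs
  have hsne : s ≠ [] := by
    rw [hs, Ne, PySem.List.sorted_eq_nil_iff]; exact hx
  obtain ⟨h, t, hst⟩ := List.exists_cons_of_ne_nil hsne
  have hget0 : PySem.List.pyGetD s 0 0 = h := by
    rw [PySem.List.pyGetD_zero, hst]; simp
  have hgetD0 : s.getD 0 0 = h := by rw [hst]; simp
  -- A's loop = flush fold over the run table minus its last run
  have hA : (PySem.List.pyRange 1 (PySem.List.len s)).foldl (getMAlterno_body s)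
        (0, PySem.List.pyGetD s 0 0, 1)
      = pairFold (s.getD 0 0) t (0, PySem.List.pyGetD s 0 0, 1) := by
    have := bridge t s 0 (0, PySem.List.pyGetD s 0 0, 1) (by rw [hst]; simp)
    simpa using this
  rw [hA, hget0, hgetD0, pairFold_eq_flush t h 1 0 h]
  -- B's counts dict is Counter(x); its sorted keys are the run values of sorted(x)
  have hctr : (List.foldl (fun d v => PySem.Dict.insert d v (PySem.Dict.getD d v 0 + 1)) (PySem.Dict.empty : PySem.Dict Int Int) x) = PySem.Dict.counter x :=
    PySem.Dict.foldl_insert_getD_add_one_eq_counter x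
  rw [hctr, PySem.Dict.keys_counter]
  set G := rleCore h 1 t with hG
  have hGne : G ≠ [] := rleCore_ne_nil h 1 t
  have hs_pw : (h :: t).Pairwise (· ≤ ·) := by
    have := PySem.List.sorted_pairwise (xs := x) (key := fun v => v)
    rw [← hs, hst] at this
    exact this
  have hGpw : (G.map Prod.fst).Pairwise (· < ·) := rle_fst_pairwise t h 1 hs_pw
  have hmemx : ∀ a, a ∈ G.map Prod.fst ↔ a ∈ x := by
    intro a
    constructor
    · intro ha
      obtain ⟨p, hp, hpa⟩ := List.mem_map.mp ha
      have hmem : a ∈ h :: t := by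
        rcases rle_fst_mem t h 1 p hp with h1 | h1
        · rw [← hpa, h1]; simp
        · rw [← hpa]; exact List.mem_cons_of_mem h h1
      have : a ∈ s := hst ▸ hmem
      rwa [hs, PySem.List.mem_sorted] at this
    · intro ha
      have : a ∈ s := by rw [hs, PySem.List.mem_sorted]; exact ha
      exact rle_mem_fst t h 1 a (hst ▸ this)
  have hcnt : ∀ p ∈ G, (x.count p.1 : Int) = p.2 := by
    intro p hp
    have hxs : x.count p.1 = (h :: t).count p.1 := by
      have hperm : (h :: t).Perm x := by
        rw [← hst, hs]; exact PySem.List.sorted_perm x (fun v => v) false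
      exact (hperm.count_eq p.1).symm
    have := rle_count t h 1 hs_pw p hp
    rw [hxs]
    by_cases hph : p.1 = h
    · rw [if_pos hph] at this
      rw [hph, List.count_cons_self]
      push_cast; omega
    · rw [if_neg hph] at this
      have hcc : List.count p.1 (h :: t) = List.count p.1 t := by
        simp [List.count_cons]; omega
      rw [hcc]
      omega
  have hKeq : PySem.List.sorted (PySem.Set.ofList x) (fun v => v) = G.map Prod.fst := by
    apply PySem.List.sorted_eq_of_perm_of_pairwise_lt
    · exact (List.perm_ext_iff_of_nodup (hGpw.imp fun hab => ne_of_lt hab)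
        (PySem.Set.nodup_ofList x)).mpr
        (fun a => by rw [PySem.Set.mem_ofList]; exact hmemx a)
    · exact hGpw
  rw [hKeq,
    max?_map_fst G (fun v => PySem.Dict.getD (PySem.Dict.counter x) v 0)
      (by intro p hp
          show (PySem.Dict.counter x).getD p.1 0 = p.2
          rw [PySem.Dict.getD_counter]; exact hcnt p hp)]
  -- split the run table into its earlier runs and its last (largest-value) run
  obtain ⟨F, p, hGfp⟩ : ∃ F p, G = F ++ [p] :=
    ⟨G.dropLast, G.getLast hGne, (List.dropLast_append_getLast hGne).symm⟩
  have hdrop : G.dropLast = F := by rw [hGfp, List.dropLast_concat]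
  have hpG : p ∈ G := by rw [hGfp]; simp
  have hcross : ∀ a ∈ F.map Prod.fst, a < p.1 := by
    intro a ha
    have hpw2 := hGfp ▸ hGpw
    rw [List.map_append, List.pairwise_append] at hpw2
    exact hpw2.2.2 a ha p.1 (by simp)
  have hplast_max : ∀ a ∈ G.map Prod.fst, a ≤ p.1 := by
    intro a ha
    rw [hGfp, List.map_append, List.mem_append] at ha
    rcases ha with h1 | h1
    · exact le_of_lt (hcross a h1)
    · simp at h1; omega
  have hp1x : p.1 ∈ x := (hmemx p.1).mp (List.mem_map.mpr ⟨p, hpG, rfl⟩)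
  have hmaxx : ∀ v ∈ x, v ≤ p.1 := fun v hv => hplast_max v ((hmemx v).mpr hv)
  rw [hGfp, List.dropLast_concat]
  cases F with
  | nil =>
    -- a single run: every element equals p.1, A and B both return it, D_ cannot hold
    have hph : p.1 = h := by
      obtain ⟨k, rest, hhead⟩ := rle_head t h 1
      have h2 : ([] : List (Int × Int)) ++ [p] = (h, k) :: rest := by
        rw [← hGfp, hG]; exact hhead
      simp at h2
      rw [h2.1]
    have honly : ∀ v ∈ x, v = p.1 := by
      intro v hv
      have := (hmemx v).mpr hv
      rw [hGfp] at this; simp at this; omega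
    constructor
    · intro _
      have hmax1 : PySem.List.max? ([] ++ [p]) (fun q : Int × Int => q.2) = some p := by
        simp [PySem.List.max?]
      rw [hmax1]
      simp [hph]
    · intro hD
      obtain ⟨M, hMx, _, ⟨v0, hv0x, hv0ne⟩, _⟩ := hD
      have := honly M hMx
      have := honly v0 hv0x
      omega
  | cons f0 gr =>
    -- at least two runs: A returns the first maximal earlier run
    obtain ⟨mF, hmf⟩ : ∃ mF, PySem.List.max? (f0 :: gr) (fun q : Int × Int => q.2) = some mF := by
      cases hmf : PySem.List.max? (f0 :: gr) (fun q : Int × Int => q.2) with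
      | none => rw [PySem.List.max?_eq_none_iff] at hmf; simp at hmf
      | some mF => exact ⟨mF, rfl⟩
    have hf0G : f0 ∈ G := by rw [hGfp]; simp
    have hf0pos : (1 : Int) ≤ f0.2 := rleCore_pos t h 1 le_rfl f0 (hG ▸ hf0G)
    have hAval : ((f0 :: gr).foldl flushStep (0, h)).2 = mF.1 := by
      rw [List.foldl_cons]
      have hfl : flushStep (0, h) f0 = (f0.2, f0.1) := by
        simp only [flushStep]; rw [if_pos (by simp; omega)]
      rw [hfl]
      rw [max?_cons_flush gr f0] at hmf
      have := Option.some.inj hmf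
      rw [← this]
    have hmFmem : mF ∈ f0 :: gr := PySem.List.max?_mem hmf
    have hmFisMax : ∀ y ∈ f0 :: gr, y.2 ≤ mF.2 := by
      intro y hy
      exact PySem.List.max?_isMax hmf y hy
    have hmFfst : mF.1 < p.1 := hcross mF.1 (List.mem_map.mpr ⟨mF, hmFmem, rfl⟩)
    have hmFG : mF ∈ G := by rw [hGfp]; exact List.mem_append_left _ hmFmem
    have hBmax : PySem.List.max? ((f0 :: gr) ++ [p]) (fun q : Int × Int => q.2)
        = some (if mF.2 < p.2 then p else mF) := max?_append_singleton (f0 :: gr) p mF hmf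
    rw [hBmax, hAval]
    constructor
    · intro hnD
      have hnlt : ¬ mF.2 < p.2 := by
        intro hlt
        apply hnD
        refine ⟨p.1, hp1x, hmaxx, ⟨f0.1, (hmemx f0.1).mp (List.mem_map.mpr ⟨f0, hf0G, rfl⟩),
          by have := hcross f0.1 (by simp); omega⟩, ?_⟩
        intro v hv hvne
        have hvG : v ∈ G.map Prod.fst := (hmemx v).mpr hv
        rw [hGfp, List.map_append, List.mem_append] at hvG
        rcases hvG with h1 | h1
        · obtain ⟨q, hq, hqv⟩ := List.mem_map.mp h1
          have hq2 : (x.count v : Int) = q.2 := hqv ▸ hcnt q (by rw [hGfp]; exact List.mem_append_left _ hq)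
          have hq2le : q.2 ≤ mF.2 := hmFisMax q hq
          have hp2 : (x.count p.1 : Int) = p.2 := hcnt p hpG
          omega
        · simp at h1; omega
      rw [if_neg hnlt]
      simp
    · intro hD
      obtain ⟨M, hMx, hMle, _, hMcnt⟩ := hD
      have hMp : M = p.1 := le_antisymm (hmaxx M hMx) (hMle p.1 hp1x)
      have hlt : mF.2 < p.2 := by
        have h1 : (x.count mF.1 : Int) = mF.2 := hcnt mF hmFG
        have h2 : (x.count p.1 : Int) = p.2 := hcnt p hpG
        have h3 : x.count mF.1 < x.count p.1 := by
          have h4 := hMcnt mF.1 ((hmemx mF.1).mp (List.mem_map.mpr ⟨mF, hmFG, rfl⟩)) (by omega)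
          rw [hMp] at h4
          exact h4
        omega
      rw [if_pos hlt]
      simpa using hmFfst

-- ===== VERDICT (by name: the statement is the Claim_ definition above) =====
theorem getMAlterno_spec : Claim_unchanged_getMAlterno := by
  unfold Claim_unchanged_getMAlterno
  intro x _ hpre
  unfold Spec_getMAlterno
  intro hnd
  exact (getM_cases x hpre).1 hnd

theorem getMAlterno_changed : Claim_changed_getMAlterno := by
  unfold Claim_changed_getMAlterno; decide

theorem getMAlterno_tight : Claim_exact_getMAlterno := by
  unfold Claim_exact_getMAlterno
  intro x _ hpre hD
  exact ne_of_lt ((getM_cases x hpre).2 hD)
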